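-- pv_equiv track=rewrite | github.com/mumble-voip/mumble | scripts/generate-CHANGES.py | textwidth
-- ===== SOURCE A (Python) =====
-- def textwidth(text):
-- 	'''
-- 		Calculate the width of 'text' in number
-- 		of characters.
--
-- 		This function counts tabs as 8 characters.
-- 	'''
-- 	count = 0
-- 	for char in text:
-- 		if char == '\t':
-- 			count += 8
-- 		else:
-- 			count += 1
-- 	return count
-- ===== SOURCE B (Python) =====
-- def textwidth(text):
-- 	'''
-- 		Calculate the width of 'text' in number
-- 		of characters.
--
-- 		This function counts tabs as 8 characters.
-- 	'''
-- 	return len(text) + 7 * text.count('\t')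
-- ===== Notes on version B (the rewrite author's own statement) =====
-- stated objective: faster
-- what changed: Replaced the per-character accumulate-and-branch loop with a closed arithmetic form combining the string length and the tab count, each obtained by one aggregate operation.
import Mathlib
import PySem

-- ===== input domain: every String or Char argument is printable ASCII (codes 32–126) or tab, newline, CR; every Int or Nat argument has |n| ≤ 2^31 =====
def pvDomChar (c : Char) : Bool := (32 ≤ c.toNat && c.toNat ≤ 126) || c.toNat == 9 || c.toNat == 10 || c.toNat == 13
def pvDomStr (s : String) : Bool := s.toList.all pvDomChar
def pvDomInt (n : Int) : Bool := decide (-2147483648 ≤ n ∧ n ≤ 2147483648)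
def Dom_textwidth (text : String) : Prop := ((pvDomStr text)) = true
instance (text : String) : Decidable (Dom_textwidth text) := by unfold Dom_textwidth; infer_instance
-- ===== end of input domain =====

-- B replaces A's per-character accumulate-and-branch loop with the closed form
-- len(text) + 7 * text.count('\t'); equal values, same asymptotic cost (objective: simpler).

-- ===== PORT A =====
def textwidth (text : String) : Int :=
  text.toList.foldl (fun count char => if char == '\t' then count + 8 else count + 1) 0

-- ===== PORT B =====
def textwidth_alt (text : String) : Int :=
  (PySem.Str.len text : Int) + 7 * (PySem.Str.count text "\t" : Int)

-- ===== PRECONDITION & SPEC =====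
def Spec_textwidth (text : String) (out : Int) : Prop := out = textwidth_alt text
instance (text : String) (out : Int) : Decidable (Spec_textwidth text out) := by unfold Spec_textwidth; infer_instance

-- ===== CLAIM (what is proved, stated in full; the proofs are below) =====
def Claim_equal_textwidth : Prop := ∀ (text : String), Dom_textwidth text → Spec_textwidth text (textwidth text)

-- ===== LEMMAS AND PROOFS =====

-- The substring counter of PySem, applied to a single-character pattern with fuel = list length,
-- is the plain element count.
theorem count_go_singleton (c : Char) (l : List Char) (acc : Nat) :
    PySem.Chars.count.go [c] l.length l acc = acc + l.count c := by
  induction l generalizing acc with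
  | nil => rw [PySem.Chars.count.go.eq_def]; simp
  | cons h t ih =>
      rw [List.length_cons, PySem.Chars.count.go.eq_def]
      by_cases hc : h = c
      · subst hc
        simp [List.isPrefixOf, ih]
        omega
      · have hch : c ≠ h := Ne.symm hc
        simp [List.isPrefixOf, beq_iff_eq, hch, hc, ih]

theorem chars_count_singleton (c : Char) (l : List Char) :
    PySem.Chars.count l [c] = l.count c := by
  simp only [PySem.Chars.count, List.isEmpty_cons, if_neg Bool.false_ne_true]
  simpa using count_go_singleton c l 0

-- A's loop computes length + 7 * (number of tabs).
theorem foldl_tab (l : List Char) (acc : Int) :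
    l.foldl (fun count char => if char == '\t' then count + 8 else count + 1) acc
      = acc + l.length + 7 * (l.count '\t' : Int) := by
  induction l generalizing acc with
  | nil => simp
  | cons h t ih =>
      rw [List.foldl_cons]
      by_cases hc : h = '\t'
      · subst hc
        rw [if_pos (by simp), ih, List.count_cons_self, List.length_cons]
        push_cast
        omega
      · rw [if_neg (by simp [hc]), ih, List.count_cons_of_ne hc, List.length_cons]
        push_cast
        omega

-- ===== VERDICT (by name: the statement is the Claim_ definition above) =====
theorem textwidth_spec : Claim_equal_textwidth := by
  intro text _
  unfold Spec_textwidth textwidth textwidth_alt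
  rw [foldl_tab]
  have ht : ("\t".toList) = ['\t'] := by decide
  simp [PySem.Str.count_eq, PySem.Str.len_eq, ht, chars_count_singleton]
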